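-- pv_equiv track=rewrite | github.com/ugufru/coco | src/spacewarp/gen_sprite_report.py | generate_sprite
-- ===== SOURCE A (Python) =====
-- def seed_to_dims(seed):
--     """Decode width/height from appearance seed byte."""
--     w_bits = (seed >> 6) & 3
--     h_bits = (seed >> 4) & 3
--     width = {0: 5, 1: 7, 2: 7, 3: 9}[w_bits]
--     height = 5 if h_bits < 2 else 7
--     return width, height
--
-- def generate_sprite(seed):
--     """Generate pixel grid from seed, matching the 6809 PRNG exactly.
--     Returns (width, height, pixels) where pixels is a set of (col, row) tuples.
--     """
--     width, height = seed_to_dims(seed)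
--     half_width = (width + 1) // 2
--     state = seed & 0xFF
--     pixels = set()
--
--     for row in range(height):
--         # PRNG update: state = (state * 5 + 3) & 0xFF
--         state = (state * 5 + 3) & 0xFF
--
--         for col in range(half_width):
--             # Extract bit at position col
--             bit = (state >> col) & 1
--             if bit:
--                 pixels.add((col, row))
--                 # Mirror (unless center column)
--                 mirror_col = width - 1 - col
--                 if mirror_col != col:
--                     pixels.add((mirror_col, row))
--
--     # Center column guarantee
--     center_col = half_width - 1
--     center_row = height // 2
--     pixels.add((center_col, center_row))
--
--     return width, height, pixels
-- ===== SOURCE B (Python) =====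
-- def seed_to_dims(seed):
--     """Decode width/height from appearance seed byte."""
--     w_bits = (seed >> 6) & 3
--     h_bits = (seed >> 4) & 3
--     width = {0: 5, 1: 7, 2: 7, 3: 9}[w_bits]
--     height = 5 if h_bits < 2 else 7
--     return width, height
--
-- def generate_sprite(seed):
--     """Stateless re-implementation: each row's PRNG state comes from the
--     closed form of the LCG (state_r = 5^(r+1)*s0 + 3*(5^(r+1)-1)/4 mod 256,
--     computed with one modular exponentiation), and the pixel set is built by
--     one flat comprehension instead of stateful nested loops."""
--     width, height = seed_to_dims(seed)
--     half_width = (width + 1) // 2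
--     s0 = seed & 0xFF
--
--     def row_state(row):
--         p = pow(5, row + 1, 1024)
--         return (p * s0 + 3 * (p - 1) // 4) % 256
--
--     pixels = {(c, row)
--               for row in range(height)
--               for col in range(half_width)
--               if (row_state(row) >> col) & 1
--               for c in ((col,) if 2 * col == width - 1 else (col, width - 1 - col))}
--     pixels.add((half_width - 1, height // 2))
--     return width, height, pixels
-- ===== Notes on version B (the rewrite author's own statement) =====
-- stated objective: alternative
-- what changed: A threads the LCG state through a stateful row loop with nested mutating column loops; B computes each row's PRNG state independently via the closed form of the LCG (one modular power per row) and builds the pixel set in a single flat comprehension, folding the mirror into the per-column emitted tuple.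
import Mathlib
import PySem

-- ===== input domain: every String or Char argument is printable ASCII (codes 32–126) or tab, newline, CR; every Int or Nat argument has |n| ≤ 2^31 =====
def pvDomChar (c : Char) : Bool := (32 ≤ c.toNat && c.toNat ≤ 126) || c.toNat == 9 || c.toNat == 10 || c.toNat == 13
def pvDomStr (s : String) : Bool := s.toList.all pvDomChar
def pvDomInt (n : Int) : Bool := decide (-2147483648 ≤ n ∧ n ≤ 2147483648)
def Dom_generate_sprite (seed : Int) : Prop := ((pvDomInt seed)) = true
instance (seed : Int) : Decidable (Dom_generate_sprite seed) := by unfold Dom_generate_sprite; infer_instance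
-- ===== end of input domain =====

-- B replaces A's threaded LCG state by the closed form of the PRNG (one modular power per
-- row) and builds the pixel set by one flat comprehension instead of stateful nested loops;
-- objective: alternative (not measurably faster).

-- ===== PORT A =====
-- same-module helper seed_to_dims (B's Python calls it too, so both ports share it)
def seedToDims (seed : Int) : Int × Int :=
  let w_bits : Int := PySem.Int.band (seed >>> (6 : Int)) 3
  let h_bits : Int := PySem.Int.band (seed >>> (4 : Int)) 3
  -- dict-literal lookup {0:5,1:7,2:7,3:9}[w_bits]: exact because band _ 3 ∈ [0,3],
  -- so the final branch is exactly the key-3 entry and KeyError is unreachable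
  let width : Int := if w_bits = 0 then 5 else if w_bits = 1 then 7 else if w_bits = 2 then 7 else 9
  let height : Int := if h_bits < 2 then 5 else 7
  (width, height)

-- body of A's inner `for col in range(half_width)` loop
-- (col ≥ 0 always, where Lean's Int `>>>` is exactly Python's `>>`)
def innerBody (width row st : Int) (px : PySem.Set (Int × Int)) (col : Int) : PySem.Set (Int × Int) :=
  let bit := PySem.Int.band (st >>> col) 1
  if bit ≠ 0 then
    let px := PySem.Set.add px (col, row)
    let mirror_col := width - 1 - col
    if mirror_col ≠ col then PySem.Set.add px (mirror_col, row) else px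
  else px

def generate_sprite (seed : Int) : Int × Int × (List (Int × Int)) :=
  let wh := seedToDims seed
  let width := wh.1
  let height := wh.2
  let half_width := PySem.Int.floordiv (width + 1) 2
  let state := PySem.Int.band seed 255
  let loop := (PySem.List.pyRange 0 height 1).foldl
      (fun (acc : Int × PySem.Set (Int × Int)) row =>
        let st := PySem.Int.band (acc.1 * 5 + 3) 255
        (st, (PySem.List.pyRange 0 half_width 1).foldl (innerBody width row st) acc.2))
      (state, PySem.Set.empty)
  let pixels := PySem.Set.add loop.2 (half_width - 1, PySem.Int.floordiv height 2)
  (width, height, pixels)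

-- ===== PORT B =====
-- Source B's row_state: closed form of the LCG, one modular power (row ≥ 0 from range, so (row+1).toNat = row+1)
def rowStateB (s0 row : Int) : Int :=
  let p := PySem.Int.powMod 5 (row + 1).toNat 1024
  PySem.Int.mod (p * s0 + PySem.Int.floordiv (3 * (p - 1)) 4) 256

-- the per-row part of Source B's flat set comprehension (filter = the `if` clause, flatMap = the `for c in …` clause)
def rowEmit (width half st row : Int) : List (Int × Int) :=
  ((PySem.List.pyRange 0 half 1).filter
      (fun col => PySem.Int.band (st >>> col) 1 ≠ 0)).flatMap
    (fun col => if 2 * col = width - 1 then [(col, row)] else [(col, row), (width - 1 - col, row)])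

def generate_sprite_alt (seed : Int) : Int × Int × (List (Int × Int)) :=
  let wh := seedToDims seed
  let width := wh.1
  let height := wh.2
  let half_width := PySem.Int.floordiv (width + 1) 2
  let s0 := PySem.Int.band seed 255
  let pix := (PySem.List.pyRange 0 height 1).flatMap
      (fun row => rowEmit width half_width (rowStateB s0 row) row)
  let pixels := PySem.Set.add (PySem.Set.ofList pix) (half_width - 1, PySem.Int.floordiv height 2)
  (width, height, pixels)

-- ===== PRECONDITION & SPEC =====
def Spec_generate_sprite (seed : Int) (out : Int × Int × (List (Int × Int))) : Prop := out = generate_sprite_alt seed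
instance (seed : Int) (out : Int × Int × (List (Int × Int))) : Decidable (Spec_generate_sprite seed out) := by unfold Spec_generate_sprite; infer_instance

-- ===== CLAIM (what is proved, stated in full; the proofs are below) =====
def Claim_equal_generate_sprite : Prop := ∀ (seed : Int), Dom_generate_sprite seed → Spec_generate_sprite seed (generate_sprite seed)

-- ===== LEMMAS AND PROOFS =====

-- A's threaded PRNG state after n updates
def iterState (s0 : Int) : Nat → Int
  | 0 => s0
  | n + 1 => PySem.Int.band (iterState s0 n * 5 + 3) 255

lemma band255_of_nonneg {n : Int} (hn : 0 ≤ n) : PySem.Int.band n 255 = n % 256 := by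
  rw [PySem.Int.band_of_nonneg hn (by norm_num)]
  have h := Nat.and_two_pow_sub_one_eq_mod n.toNat 8
  norm_num at h
  rw [show Int.toNat 255 = 255 from rfl, h]
  omega

lemma powMod_eq (b : Int) (e : Nat) {m : Int} (hm : 0 < m) :
    PySem.Int.powMod b e m = b ^ e % m := by
  simp [PySem.Int.powMod, PySem.Int.mod_eq_emod_of_pos hm]

lemma rowStateB_cast (s0 : Int) (k : Nat) :
    rowStateB s0 (k : Int) =
      ((5 ^ (k + 1) % 1024) * s0 + 3 * ((5 ^ (k + 1) % 1024) - 1) / 4) % 256 := by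
  unfold rowStateB
  have h1 : ((k : Int) + 1).toNat = k + 1 := by omega
  simp only [h1, powMod_eq 5 (k+1) (show (0:Int) < 1024 by norm_num),
    PySem.Int.floordiv_eq_ediv_of_pos (show (0:Int) < 4 by norm_num),
    PySem.Int.mod_eq_emod_of_pos (show (0:Int) < 256 by norm_num)]

lemma pow5_mod4 (k : Nat) : ((5:Int) ^ (k+1) % 1024) % 4 = 1 := by
  rw [Int.emod_emod_of_dvd _ (by norm_num)]
  have h : (5:Int)^(k+1) % 4 = 1^(k+1) % 4 := Int.ModEq.pow (k+1) (by decide)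
  simpa using h

lemma pow5_step (k : Nat) : (5:Int) ^ (k+2) % 1024 = (5 * ((5:Int)^(k+1) % 1024)) % 1024 := by
  rw [show (5:Int)^(k+2) = 5 * 5^(k+1) by ring, Int.mul_emod, Int.mul_emod 5 (5^(k+1) % 1024)]
  simp [Int.emod_emod_of_dvd]

lemma arith_step (p p' s0 : Int) (hp : 0 ≤ p) (hp4 : p % 4 = 1) (hp' : p' = (5 * p) % 1024) :
    ((p * s0 + 3 * (p - 1) / 4) % 256 * 5 + 3) % 256
      = (p' * s0 + 3 * (p' - 1) / 4) % 256 := by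
  obtain ⟨a, rfl⟩ : ∃ a, p = 4 * a + 1 := ⟨p / 4, by omega⟩
  obtain ⟨t, ht⟩ : ∃ t, p' = 20 * a + 5 - 1024 * t := ⟨(5 * (4 * a + 1)) / 1024, by omega⟩
  subst ht
  have h1 : 3 * (4 * a + 1 - 1) / 4 = 3 * a := by omega
  have h2 : 3 * (20 * a + 5 - 1024 * t - 1) / 4 = 15 * a + 3 - 768 * t := by omega
  rw [h1, h2]
  have h3 : (4 * a + 1) * s0 = 4 * (a * s0) + s0 := by ring
  have h4 : (20 * a + 5 - 1024 * t) * s0 = 20 * (a * s0) + 5 * s0 - 1024 * (t * s0) := by ring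
  rw [h3, h4]
  generalize a * s0 = u
  generalize t * s0 = v
  omega

-- the closed form of the LCG: A's state entering row k equals Source B's row_state(k)
lemma cf (s0 : Int) (hs : 0 ≤ s0) : ∀ k : Nat, iterState s0 (k + 1) = rowStateB s0 (k : Int) := by
  intro k
  induction k with
  | zero =>
    show PySem.Int.band (s0 * 5 + 3) 255 = _
    rw [rowStateB_cast, band255_of_nonneg (by omega)]
    norm_num
    omega
  | succ n ih =>
    show PySem.Int.band (iterState s0 (n + 1) * 5 + 3) 255 = _
    rw [ih, rowStateB_cast, rowStateB_cast,
      band255_of_nonneg (by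
        have := Int.emod_nonneg ((5 ^ (n + 1) % 1024) * s0 + 3 * ((5 ^ (n + 1) % 1024) - 1) / 4)
          (show (256:Int) ≠ 0 by norm_num)
        omega)]
    exact arith_step _ _ s0 (Int.emod_nonneg _ (by norm_num)) (pow5_mod4 n) (pow5_step n)

-- A's inner column loop emits exactly B's per-row flat list
lemma inner_eq (width st row : Int) : ∀ (n : Nat) (px : PySem.Set (Int × Int)),
    (PySem.List.pyRange 0 (n : Int) 1).foldl (innerBody width row st) px
      = (rowEmit width (n : Int) st row).foldl PySem.Set.add px := by
  intro n
  induction n with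
  | zero =>
    intro px
    simp [PySem.List.pyRange_one_eq_nil, rowEmit]
  | succ m ih =>
    intro px
    have hc : ((m + 1 : Nat) : Int) = (m : Int) + 1 := by push_cast; ring
    rw [hc, PySem.List.pyRange_one_succ_right (by positivity), List.foldl_append, ih]
    unfold rowEmit
    rw [PySem.List.pyRange_one_succ_right (by positivity), List.filter_append,
      List.flatMap_append, List.foldl_append]
    generalize ((((PySem.List.pyRange 0 (m:Int) 1).filter _).flatMap _).foldl PySem.Set.add px) = px'
    by_cases hb : PySem.Int.band (st >>> (m : Int)) 1 = 0
    · simp [innerBody, hb]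
    · by_cases hm2 : 2 * (m:Int) = width - 1
      · have hmm : width - 1 - (m:Int) = (m:Int) := by omega
        simp [innerBody, hb, hm2, hmm]
      · have hmm : ¬ (width - 1 - (m:Int) = (m:Int)) := by omega
        simp [innerBody, hb, hm2, hmm]

lemma inner_eq' (width st row half : Int) (px : PySem.Set (Int × Int)) :
    (PySem.List.pyRange 0 half 1).foldl (innerBody width row st) px
      = (rowEmit width half st row).foldl PySem.Set.add px := by
  rcases le_or_gt half 0 with h | h
  · rw [rowEmit, PySem.List.pyRange_one_eq_nil h]
    simp
  · have : half = ((half.toNat : Nat) : Int) := by omega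
    rw [this]
    exact inner_eq width st row half.toNat px

-- A's stateful row loop equals B's stateless flatMap, with the state in closed form
lemma rows_eq (width half s0 : Int) (hs : 0 ≤ s0) : ∀ h : Nat,
    (PySem.List.pyRange 0 (h : Int) 1).foldl
        (fun (acc : Int × PySem.Set (Int × Int)) row =>
          let st := PySem.Int.band (acc.1 * 5 + 3) 255
          (st, (PySem.List.pyRange 0 half 1).foldl (innerBody width row st) acc.2))
        (s0, PySem.Set.empty)
      = (iterState s0 h,
         ((PySem.List.pyRange 0 (h : Int) 1).flatMap
            (fun row => rowEmit width half (rowStateB s0 row) row)).foldl PySem.Set.add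
           PySem.Set.empty) := by
  intro h
  induction h with
  | zero => simp [PySem.List.pyRange_one_eq_nil, iterState]
  | succ n ih =>
    have hc : ((n + 1 : Nat) : Int) = (n : Int) + 1 := by push_cast; ring
    rw [hc, PySem.List.pyRange_one_succ_right (by positivity), List.foldl_append,
      List.flatMap_append, List.foldl_append, ih]
    simp only [List.foldl_cons, List.foldl_nil, List.flatMap_cons, List.flatMap_nil,
      List.append_nil]
    have hst : PySem.Int.band (iterState s0 n * 5 + 3) 255 = rowStateB s0 (n : Int) := cf s0 hs n
    rw [hst, inner_eq', show iterState s0 (n + 1) = PySem.Int.band (iterState s0 n * 5 + 3) 255 from rfl, hst]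

lemma rows_eq' (width half s0 height : Int) (hs : 0 ≤ s0) (hh : ∃ h : Nat, height = (h : Int)) :
    ((PySem.List.pyRange 0 height 1).foldl
        (fun (acc : Int × PySem.Set (Int × Int)) row =>
          let st := PySem.Int.band (acc.1 * 5 + 3) 255
          (st, (PySem.List.pyRange 0 half 1).foldl (innerBody width row st) acc.2))
        (s0, PySem.Set.empty)).2
      = PySem.Set.ofList ((PySem.List.pyRange 0 height 1).flatMap
            (fun row => rowEmit width half (rowStateB s0 row) row)) := by
  obtain ⟨h, rfl⟩ := hh
  rw [rows_eq width half s0 hs h]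
  rfl

-- ===== VERDICT (by name: the statement is the Claim_ definition above) =====
theorem generate_sprite_spec : Claim_equal_generate_sprite := by
  intro seed _
  unfold Spec_generate_sprite generate_sprite generate_sprite_alt
  dsimp only
  have hs : 0 ≤ PySem.Int.band seed 255 := by
    rw [PySem.Int.band_comm]
    exact PySem.Int.band_nonneg_of_nonneg_left _ (by norm_num)
  have hh : ∃ h : Nat, (seedToDims seed).2 = (h : Int) := by
    unfold seedToDims
    dsimp only
    split_ifs
    exacts [⟨5, by norm_num⟩, ⟨7, by norm_num⟩]
  rw [rows_eq' _ _ _ _ hs hh]
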